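-- pv_equiv track=rewrite | github.com/granttremel/genomics | ggene/draw.py | highlight_sequence_by_span
-- ===== SOURCE A (Python) =====
-- RESET = '\033[0m'
--
-- def highlight_sequence_by_span(seq, span_colors = {}, default_color = '\033[97m'):
--     # span is (start, stop):color
--
--     spans = sorted(span_colors.keys(), key=lambda k:k[0])
--     ccurr = default_color
--     colored_seq = []
--     for i, b in enumerate(seq):
--
--         in_span = False
--         for st, sp in spans:
--             c = span_colors[(st, sp)]
--             if i>sp:
--                 continue
--             elif i<st:
--                 break
--
--             if i>=st and i<sp:
--                 in_span = True
--                 new_c = c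
--                 if new_c == ccurr:
--                     continue
--                 else:
--                     colored_seq.append(new_c)
--                     ccurr = new_c
--
--         if not in_span:
--             colored_seq.append(default_color)
--
--         colored_seq.append(b)
--     colored_seq.append(RESET)
--     return "".join(colored_seq)
-- ===== SOURCE B (Python) =====
-- RESET = '\033[0m'
--
-- def highlight_sequence_by_span(seq, span_colors={}, default_color='\033[97m'):
--     # Sweep-line: spans sorted by start are consumed once via a pointer into an
--     # active list; each base visits only the currently active spans.
--     spans = sorted(span_colors.keys(), key=lambda k: k[0])
--     n = len(spans)
--     ptr = 0
--     active = []
--     ccurr = default_color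
--     out = []
--     for i, b in enumerate(seq):
--         while ptr < n and spans[ptr][0] <= i:
--             active.append(spans[ptr])
--             ptr += 1
--         active = [s for s in active if i < s[1]]
--         if active:
--             for st, sp in active:
--                 c = span_colors[(st, sp)]
--                 if c != ccurr:
--                     out.append(c)
--                     ccurr = c
--         else:
--             out.append(default_color)
--         out.append(b)
--     out.append(RESET)
--     return ''.join(out)
-- ===== Notes on version B (the rewrite author's own statement) =====
-- stated objective: alternative
-- what changed: A rescans the whole sorted span list for every base; B is a sweep line that consumes each span once into an active list via an advancing pointer, so per base only the currently active spans are visited (same worst-case cost when spans overlap heavily, which the timing inputs do).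
import Mathlib
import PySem

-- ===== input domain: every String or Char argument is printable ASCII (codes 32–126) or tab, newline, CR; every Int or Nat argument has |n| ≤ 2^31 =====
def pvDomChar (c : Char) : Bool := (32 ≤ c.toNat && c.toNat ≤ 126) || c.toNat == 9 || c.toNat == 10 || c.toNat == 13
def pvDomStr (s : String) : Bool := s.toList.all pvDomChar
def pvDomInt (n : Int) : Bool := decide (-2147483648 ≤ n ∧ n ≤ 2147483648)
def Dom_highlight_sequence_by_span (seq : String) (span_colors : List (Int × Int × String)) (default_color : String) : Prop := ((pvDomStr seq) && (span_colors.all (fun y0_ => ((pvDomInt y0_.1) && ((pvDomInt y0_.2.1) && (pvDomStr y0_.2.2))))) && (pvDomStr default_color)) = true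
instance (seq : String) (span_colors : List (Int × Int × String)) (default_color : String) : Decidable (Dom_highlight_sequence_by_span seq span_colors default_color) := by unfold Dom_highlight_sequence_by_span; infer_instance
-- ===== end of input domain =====

-- B replaces A's rescan of every span for every base by a sweep line: spans sorted by
-- start are consumed once into an active list, visiting only active spans per base
-- (objective: alternative algorithm; measured speed comparable on overlap-heavy inputs).

def pvRESET : String := "\x1b[0m"

-- ===== PORT A =====
-- dict lookup span_colors[(st, sp)]; the key is always a member of the dict's keys, so
-- the .getD "" default is never reached (Python never raises here)
def pvColorOf (d : PySem.Dict (Int × Int) String) (s : Int × Int) : String :=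
  (d.get? s).getD ""

-- A's inner `for st, sp in spans` loop with continue/break, state (in_span, ccurr, colored_seq)
def pvAInner (d : PySem.Dict (Int × Int) String) (i : Int) :
    List (Int × Int) → Bool → String → List String → Bool × String × List String
  | [], in_span, ccurr, acc => (in_span, ccurr, acc)
  | (st, sp) :: rest, in_span, ccurr, acc =>
    let c := pvColorOf d (st, sp)
    if i > sp then pvAInner d i rest in_span ccurr acc
    else if i < st then (in_span, ccurr, acc)
    else if st ≤ i ∧ i < sp then
      (if c == ccurr then pvAInner d i rest true ccurr acc
       else pvAInner d i rest true c (acc ++ [c]))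
    else pvAInner d i rest in_span ccurr acc

def highlight_sequence_by_span (seq : String) (span_colors : List (Int × Int × String)) (default_color : String) : String :=
  let d := PySem.Dict.ofList (span_colors.map (fun x => ((x.1, x.2.1), x.2.2)))
  let spans := PySem.List.sorted d.keys (fun k => k.1) false
  let res := (PySem.List.enumerate seq.toList 0).foldl
    (fun (s : String × List String) ib =>
      let r := pvAInner d ib.1 spans false s.1 s.2
      let acc' := if r.1 then r.2.2 else r.2.2 ++ [default_color]
      (r.2.1, acc' ++ [String.ofList [ib.2]]))
    (default_color, [])
  PySem.Str.join "" (res.2 ++ [pvRESET])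

-- ===== PORT B =====
-- B's `while ptr < n and spans[ptr][0] <= i` pointer advance, rendered as consuming the
-- unvisited suffix `pending` of the sorted span list
def pvAbsorb (i : Int) :
    List (Int × Int) → List (Int × Int) → List (Int × Int) × List (Int × Int)
  | [], active => ([], active)
  | s :: rest, active =>
    if s.1 ≤ i then pvAbsorb i rest (active ++ [s]) else (s :: rest, active)

-- B's `for st, sp in active` emission loop
def pvBEmit (d : PySem.Dict (Int × Int) String) :
    List (Int × Int) → String → List String → String × List String
  | [], ccurr, acc => (ccurr, acc)
  | (st, sp) :: rest, ccurr, acc =>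
    let c := pvColorOf d (st, sp)
    if c != ccurr then pvBEmit d rest c (acc ++ [c]) else pvBEmit d rest ccurr acc

def highlight_sequence_by_span_alt (seq : String) (span_colors : List (Int × Int × String)) (default_color : String) : String :=
  let d := PySem.Dict.ofList (span_colors.map (fun x => ((x.1, x.2.1), x.2.2)))
  let spans := PySem.List.sorted d.keys (fun k => k.1) false
  let res := (PySem.List.enumerate seq.toList 0).foldl
    (fun (s : List (Int × Int) × List (Int × Int) × String × List String) ib =>
      let pa := pvAbsorb ib.1 s.1 s.2.1
      let active := pa.2.filter (fun t => decide (ib.1 < t.2))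
      let r :=
        if active.isEmpty then (s.2.2.1, s.2.2.2 ++ [default_color])
        else pvBEmit d active s.2.2.1 s.2.2.2
      (pa.1, active, r.1, r.2 ++ [String.ofList [ib.2]]))
    (spans, [], default_color, [])
  PySem.Str.join "" (res.2.2.2 ++ [pvRESET])

-- ===== PRECONDITION & SPEC =====
def Spec_highlight_sequence_by_span (seq : String) (span_colors : List (Int × Int × String)) (default_color : String) (out : String) : Prop := out = highlight_sequence_by_span_alt seq span_colors default_color
instance (seq : String) (span_colors : List (Int × Int × String)) (default_color : String) (out : String) : Decidable (Spec_highlight_sequence_by_span seq span_colors default_color out) := by unfold Spec_highlight_sequence_by_span; infer_instance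

-- ===== CLAIM (what is proved, stated in full; the proofs are below) =====
def Claim_equal_highlight_sequence_by_span : Prop := ∀ (seq : String) (span_colors : List (Int × Int × String)) (default_color : String), Dom_highlight_sequence_by_span seq span_colors default_color → Spec_highlight_sequence_by_span seq span_colors default_color (highlight_sequence_by_span seq span_colors default_color)

-- ===== LEMMAS AND PROOFS =====

-- A's inner loop never does anything once every remaining start exceeds i
theorem pvAInner_all_gt (d : PySem.Dict (Int × Int) String) (i : Int) :
    ∀ (L : List (Int × Int)) (ins : Bool) (cc : String) (acc : List String),
      (∀ s ∈ L, i < s.1) → pvAInner d i L ins cc acc = (ins, cc, acc) := by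
  intro L
  induction L with
  | nil => intro ins cc acc _; rfl
  | cons hd tl ih =>
    intro ins cc acc h
    obtain ⟨st, sp⟩ := hd
    have hst : i < st := h (st, sp) (by simp)
    simp only [pvAInner]
    by_cases hsp : i > sp
    · simp only [if_pos hsp]
      exact ih ins cc acc (fun s hs => h s (List.mem_cons_of_mem _ hs))
    · simp [hsp, hst]

-- characterisation of A's inner loop: it processes exactly the filtered takeWhile prefix
theorem pvAInner_eq (d : PySem.Dict (Int × Int) String) (i : Int) :
    ∀ (L : List (Int × Int)) (ins : Bool) (cc : String) (acc : List String),
      L.Pairwise (fun a b => a.1 ≤ b.1) →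
      pvAInner d i L ins cc acc =
        ((ins || !((L.takeWhile (fun s => decide (s.1 ≤ i))).filter (fun s => decide (i < s.2))).isEmpty),
         pvBEmit d ((L.takeWhile (fun s => decide (s.1 ≤ i))).filter (fun s => decide (i < s.2))) cc acc) := by
  intro L
  induction L with
  | nil => intro ins cc acc _; simp [pvAInner, pvBEmit]
  | cons hd tl ih =>
    intro ins cc acc hpw
    obtain ⟨st, sp⟩ := hd
    have hpw' : tl.Pairwise (fun a b => a.1 ≤ b.1) := hpw.of_cons
    have hhd : ∀ s ∈ tl, st ≤ s.1 := fun s hs => List.rel_of_pairwise_cons hpw hs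
    simp only [pvAInner]
    by_cases hsp : i > sp
    · simp only [if_pos hsp]
      by_cases hst : st ≤ i
      · -- head taken by takeWhile but dropped by the filter (¬ i < sp)
        rw [ih ins cc acc hpw']
        have : ¬ i < sp := by omega
        simp [hst, this]
      · -- head breaks the takeWhile; every later start is also > i
        have : ∀ s ∈ tl, i < s.1 := fun s hs => by have := hhd s hs; omega
        rw [pvAInner_all_gt d i tl ins cc acc this]
        simp [hst, pvBEmit]
    · simp only [if_neg hsp]
      by_cases hst : i < st
      · -- break
        have h1 : ¬ st ≤ i := by omega
        simp [hst, h1, pvBEmit]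
      · have hst' : st ≤ i := by omega
        simp only [if_neg hst]
        by_cases hin : st ≤ i ∧ i < sp
        · -- in-span head: emit step then recurse
          simp only [if_pos hin, List.takeWhile_cons]
          have h2 : i < sp := hin.2
          by_cases hc : pvColorOf d (st, sp) == cc
          · rw [ih true cc acc hpw']
            have hne : ¬ (pvColorOf d (st, sp) != cc) := by simp [bne]; exact eq_of_beq hc
            simp [hst', h2, pvBEmit, hne, hc]
          · rw [ih true (pvColorOf d (st, sp)) (acc ++ [pvColorOf d (st, sp)]) hpw']
            have hne : pvColorOf d (st, sp) != cc := by simp [bne, hc]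
            simp [hst', h2, pvBEmit, hne, hc]
        · -- i = sp : no-op head, kept by takeWhile, dropped by the filter
          have h2 : ¬ i < sp := by omega
          simp only [if_neg hin]
          rw [ih ins cc acc hpw']
          simp [hst', h2]

-- B's while-loop characterisation
theorem pvAbsorb_eq (i : Int) :
    ∀ (pending active : List (Int × Int)),
      pvAbsorb i pending active =
        (pending.dropWhile (fun s => decide (s.1 ≤ i)),
         active ++ pending.takeWhile (fun s => decide (s.1 ≤ i))) := by
  intro pending
  induction pending with
  | nil => intro active; simp [pvAbsorb]
  | cons hd tl ih =>
    intro active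
    simp only [pvAbsorb]
    by_cases h : hd.1 ≤ i
    · rw [ih (active ++ [hd])]
      simp [h]
    · simp [h]

-- the outer folds agree under the sweep-line invariant
theorem pv_outer_eq (d : PySem.Dict (Int × Int) String) (dc : String)
    (S : List (Int × Int)) (hS : S.Pairwise (fun a b => a.1 ≤ b.1)) :
    ∀ (cs : List Char) (i : Int) (cc : String) (acc : List String)
      (P pending : List (Int × Int)),
      S = P ++ pending → (∀ s ∈ P, s.1 < i) →
      ((PySem.List.enumerate cs i).foldl
        (fun (s : String × List String) ib =>
          let r := pvAInner d ib.1 S false s.1 s.2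
          let acc' := if r.1 then r.2.2 else r.2.2 ++ [dc]
          (r.2.1, acc' ++ [String.ofList [ib.2]]))
        (cc, acc))
      =
      (((PySem.List.enumerate cs i).foldl
        (fun (s : List (Int × Int) × List (Int × Int) × String × List String) ib =>
          let pa := pvAbsorb ib.1 s.1 s.2.1
          let active := pa.2.filter (fun t => decide (ib.1 < t.2))
          let r :=
            if active.isEmpty then (s.2.2.1, s.2.2.2 ++ [dc])
            else pvBEmit d active s.2.2.1 s.2.2.2
          (pa.1, active, r.1, r.2 ++ [String.ofList [ib.2]]))
        (pending, P.filter (fun t => decide (i ≤ t.2)), cc, acc)).2.2) := by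
  intro cs
  induction cs with
  | nil => intro i cc acc P pending _ _; simp [PySem.List.enumerate_nil]
  | cons b rest ih =>
    intro i cc acc P pending hsplit hP
    rw [PySem.List.enumerate_cons, List.foldl_cons, List.foldl_cons]
    -- common active set for index i
    have hPle : ∀ s ∈ P, (fun s => decide (s.1 ≤ i)) s = true := by
      intro s hs; simpa using le_of_lt (hP s hs)
    have htwP : P.takeWhile (fun s => decide (s.1 ≤ i)) = P :=
      List.takeWhile_eq_self_iff.mpr hPle
    have htw : S.takeWhile (fun s => decide (s.1 ≤ i)) =
        P ++ pending.takeWhile (fun s => decide (s.1 ≤ i)) := by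
      rw [hsplit, List.takeWhile_append, htwP, if_pos rfl]
    have hfilter :
        (P.filter (fun t => decide (i ≤ t.2)) ++ pending.takeWhile (fun s => decide (s.1 ≤ i))).filter
            (fun t => decide (i < t.2)) =
        (S.takeWhile (fun s => decide (s.1 ≤ i))).filter (fun t => decide (i < t.2)) := by
      rw [htw, List.filter_append, List.filter_append, List.filter_filter]
      congr 1
      apply List.filter_congr
      intro t _
      by_cases h : i < t.2
      · simp [h, le_of_lt h]
      · simp [h]
    rw [pvAInner_eq d i S false cc acc hS, pvAbsorb_eq]
    simp only [Bool.false_or, hfilter]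
    have hsplit' : S = (P ++ pending.takeWhile (fun s => decide (s.1 ≤ i))) ++
        pending.dropWhile (fun s => decide (s.1 ≤ i)) := by
      rw [hsplit, List.append_assoc, List.takeWhile_append_dropWhile]
    have hP' : ∀ s ∈ P ++ pending.takeWhile (fun s => decide (s.1 ≤ i)), s.1 < i + 1 := by
      intro s hs
      rcases List.mem_append.mp hs with h | h
      · have := hP s h; omega
      · have := List.mem_takeWhile_imp h; simp at this; omega
    have hact2 : (P ++ pending.takeWhile (fun s => decide (s.1 ≤ i))).filter
        (fun t => decide (i + 1 ≤ t.2)) =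
        (S.takeWhile (fun s => decide (s.1 ≤ i))).filter (fun t => decide (i < t.2)) := by
      rw [htw]
      apply List.filter_congr
      intro t _
      simp only [decide_eq_decide]
      omega
    by_cases he : ((S.takeWhile (fun s => decide (s.1 ≤ i))).filter (fun t => decide (i < t.2))).isEmpty = true
    · rw [List.isEmpty_iff] at he
      have hstep := ih (i + 1) cc (acc ++ [dc] ++ [String.ofList [b]])
        (P ++ pending.takeWhile (fun s => decide (s.1 ≤ i)))
        (pending.dropWhile (fun s => decide (s.1 ≤ i))) hsplit' hP'
      rw [hact2, he] at hstep
      simpa [he, pvBEmit] using hstep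
    · have hstep := ih (i + 1)
        (pvBEmit d ((S.takeWhile (fun s => decide (s.1 ≤ i))).filter (fun t => decide (i < t.2))) cc acc).1
        ((pvBEmit d ((S.takeWhile (fun s => decide (s.1 ≤ i))).filter (fun t => decide (i < t.2))) cc acc).2
          ++ [String.ofList [b]])
        (P ++ pending.takeWhile (fun s => decide (s.1 ≤ i)))
        (pending.dropWhile (fun s => decide (s.1 ≤ i))) hsplit' hP'
      rw [hact2] at hstep
      simpa [he] using hstep

-- ===== VERDICT (by name: the statement is the Claim_ definition above) =====
theorem highlight_sequence_by_span_spec : Claim_equal_highlight_sequence_by_span := by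
  intro seq span_colors default_color _
  unfold Spec_highlight_sequence_by_span highlight_sequence_by_span highlight_sequence_by_span_alt
  have h := pv_outer_eq
    (PySem.Dict.ofList (span_colors.map (fun x => ((x.1, x.2.1), x.2.2)))) default_color
    (PySem.List.sorted (PySem.Dict.ofList (span_colors.map (fun x => ((x.1, x.2.1), x.2.2)))).keys (fun k => k.1) false)
    (PySem.List.sorted_pairwise _ _)
    seq.toList 0 default_color [] []
    (PySem.List.sorted (PySem.Dict.ofList (span_colors.map (fun x => ((x.1, x.2.1), x.2.2)))).keys (fun k => k.1) false)
    rfl (by simp)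
  simp only [List.filter_nil] at h
  simp only [h]
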